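-- pv_equiv track=rewrite | github.com/ingridlarssen/TDT4310 | lab4/lab4_2.py | ngram_frequence
-- ===== SOURCE A (Python) =====
-- def ngram_frequence(ngrams):
--     counts = {}
--     for ng in ngrams:
--         seq = " ".join(ng[:-1])
--         last = ng[-1]
--
--         if seq not in counts:
--             counts[seq] = {}
--         if last not in counts[seq]:
--             counts[seq][last] = 0
--
--         counts[seq][last] += 1
--     return counts
-- ===== SOURCE B (Python) =====
-- def ngram_frequence(ngrams):
--     groups = {}
--     for ng in ngrams:
--         groups.setdefault(" ".join(ng[:-1]), []).append(ng[-1])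
--     return {seq: {t: lasts.count(t) for t in dict.fromkeys(lasts)}
--             for seq, lasts in groups.items()}
-- ===== Notes on version B (the rewrite author's own statement) =====
-- stated objective: alternative
-- what changed: B separates grouping from counting: one pass builds a dict mapping each prefix to the list of its last tokens, then a comprehension tabulates each group's frequencies via dict.fromkeys/list.count, instead of A's single loop that interleaves nested-dict creation and in-place increments.
import Mathlib
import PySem

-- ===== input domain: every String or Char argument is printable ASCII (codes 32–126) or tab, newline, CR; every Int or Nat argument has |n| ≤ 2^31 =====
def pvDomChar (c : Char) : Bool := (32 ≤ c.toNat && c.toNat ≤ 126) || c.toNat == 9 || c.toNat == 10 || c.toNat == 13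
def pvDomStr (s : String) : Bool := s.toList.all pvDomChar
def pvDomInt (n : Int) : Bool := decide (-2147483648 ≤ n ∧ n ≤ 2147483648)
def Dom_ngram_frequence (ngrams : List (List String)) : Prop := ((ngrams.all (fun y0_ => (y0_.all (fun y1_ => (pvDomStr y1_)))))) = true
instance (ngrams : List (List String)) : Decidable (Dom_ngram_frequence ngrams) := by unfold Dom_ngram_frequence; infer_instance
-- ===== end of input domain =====

-- B groups last tokens by prefix first and tabulates each group afterwards, instead of A's
-- interleaved nested-dict counting loop; equivalent, no speed claim (objective: alternative).

-- ===== PORT A =====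
-- one iteration of A's loop body (skips an ngram only where Python would raise, which Pre_ excludes)
def ngfA_step (counts : PySem.Dict String (PySem.Dict String Int)) (ng : List String) :
    PySem.Dict String (PySem.Dict String Int) :=
  match PySem.List.pyGet? ng (-1) with
  | none => counts
  | some last =>
    let seq := PySem.Str.join " " (PySem.List.slice ng none (some (-1)))
    let c1 := if counts.contains seq then counts else counts.insert seq PySem.Dict.empty
    let inner := c1.getD seq PySem.Dict.empty
    let inner1 := if inner.contains last then inner else inner.insert last 0
    c1.insert seq (inner1.insert last (inner1.getD last 0 + 1))

def ngram_frequence (ngrams : List (List String)) : List (String × List (String × Int)) :=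
  ((ngrams.foldl ngfA_step PySem.Dict.empty).items.map (fun p => (p.1, p.2.items)))

-- ===== PORT B =====
-- one iteration of B's grouping loop: groups.setdefault(seq, []).append(last)
def ngfB_step (groups : PySem.Dict String (List String)) (ng : List String) :
    PySem.Dict String (List String) :=
  match PySem.List.pyGet? ng (-1) with
  | none => groups
  | some last =>
    groups.modify (PySem.Str.join " " (PySem.List.slice ng none (some (-1)))) [] (· ++ [last])

def ngram_frequence_alt (ngrams : List (List String)) : List (String × List (String × Int)) :=
  let groups := ngrams.foldl ngfB_step PySem.Dict.empty
  groups.items.map (fun p => (p.1, (PySem.Set.ofList p.2).map (fun t => (t, (p.2.count t : Int)))))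

-- ===== PRECONDITION & SPEC =====
-- Pre_ excludes exactly the inputs containing an empty ngram, where Python's ng[-1] raises IndexError (in A and in B alike).
def Pre_ngram_frequence (ngrams : List (List String)) : Prop := ∀ ng ∈ ngrams, ng ≠ []
instance (ngrams : List (List String)) : Decidable (Pre_ngram_frequence ngrams) := by
  unfold Pre_ngram_frequence; infer_instance
def pvWitness_ngram_frequence : List (List String) := [["a", "b"], ["a", "c"], ["a", "b"], ["x"]]

def Spec_ngram_frequence (ngrams : List (List String)) (out : List (String × List (String × Int))) : Prop := out = ngram_frequence_alt ngrams
instance (ngrams : List (List String)) (out : List (String × List (String × Int))) : Decidable (Spec_ngram_frequence ngrams out) := by unfold Spec_ngram_frequence; infer_instance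

-- ===== CLAIM (what is proved, stated in full; the proofs are below) =====
def Claim_equal_ngram_frequence : Prop := ∀ (ngrams : List (List String)), Dom_ngram_frequence ngrams → Pre_ngram_frequence ngrams → Spec_ngram_frequence ngrams (ngram_frequence ngrams)

-- ===== LEMMAS AND PROOFS =====

-- the simulation map: a grouping dict rendered as A's nested counting dict
def ngfMap (g : PySem.Dict String (List String)) : PySem.Dict String (PySem.Dict String Int) :=
  PySem.Dict.mk (g.items.map (fun p => (p.1, PySem.Dict.counter p.2)))

theorem ngfMap_contains (g : PySem.Dict String (List String)) (s : String) :
    (ngfMap g).contains s = g.contains s := by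
  simp only [ngfMap, PySem.Dict.contains, List.any_map]
  rfl

theorem ngfMap_keys (g : PySem.Dict String (List String)) :
    (ngfMap g).keys = g.keys := by
  simp [ngfMap, PySem.Dict.keys, List.map_map, Function.comp]

theorem ngfMap_getD (g : PySem.Dict String (List String)) (hnd : g.keys.Nodup) (s : String) :
    (ngfMap g).getD s PySem.Dict.empty = PySem.Dict.counter (g.getD s []) := by
  by_cases h : g.contains s = true
  · obtain ⟨⟨s', l⟩, hmem, hbeq⟩ := List.any_eq_true.mp h
    have hs : s' = s := by simpa using hbeq
    subst hs
    have h1 : g.getD s' [] = l := PySem.Dict.getD_of_mem_items g hmem hnd _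
    have h2 : (s', PySem.Dict.counter l) ∈ (ngfMap g).items := by
      simp only [ngfMap]
      exact List.mem_map.mpr ⟨(s', l), hmem, rfl⟩
    have hnd2 : (ngfMap g).keys.Nodup := by rw [ngfMap_keys]; exact hnd
    rw [PySem.Dict.getD_of_mem_items _ h2 hnd2, h1]
  · have h' : g.contains s = false := by simpa using h
    have h'' : (ngfMap g).contains s = false := by rw [ngfMap_contains]; exact h'
    rw [PySem.Dict.getD_of_not_contains _ _ h'', PySem.Dict.getD_of_not_contains _ _ h']
    rfl

theorem ngfMap_insert (g : PySem.Dict String (List String)) (s : String) (m : List String) :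
    ngfMap (g.insert s m) = (ngfMap g).insert s (PySem.Dict.counter m) := by
  apply PySem.Dict.ext
  by_cases h : g.contains s = true
  · have h2 : (ngfMap g).contains s = true := by rw [ngfMap_contains]; exact h
    rw [PySem.Dict.items_insert_of_contains _ _ h2]
    simp only [ngfMap, PySem.Dict.items_insert_of_contains _ _ h, List.map_map]
    apply List.map_congr_left
    intro p _
    by_cases hp : p.1 = s <;> simp [hp]
  · have h' : g.contains s = false := by simpa using h
    have h2 : (ngfMap g).contains s = false := by rw [ngfMap_contains]; exact h'
    rw [PySem.Dict.items_insert_of_not_contains _ _ h2]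
    simp [ngfMap, PySem.Dict.items_insert_of_not_contains _ _ h']

theorem ngfInnerStep (d : PySem.Dict String Int) (t : String) :
    ((if d.contains t then d else d.insert t 0).insert t
      ((if d.contains t then d else d.insert t 0).getD t 0 + 1)) = d.modify t 0 (· + 1) := by
  by_cases h : d.contains t = true
  · simp [h, PySem.Dict.modify]
  · have h' : d.contains t = false := by simpa using h
    simp [h', PySem.Dict.modify, PySem.Dict.insert_insert_self, PySem.Dict.getD_insert_self,
      PySem.Dict.getD_of_not_contains _ _ h']

theorem ngfStep (g : PySem.Dict String (List String)) (ng : List String)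
    (hnd : g.keys.Nodup) : ngfA_step (ngfMap g) ng = ngfMap (ngfB_step g ng) := by
  cases hpg : PySem.List.pyGet? ng (-1) with
  | none => simp [ngfA_step, ngfB_step, hpg]
  | some t =>
    simp only [ngfA_step, ngfB_step, hpg, PySem.Dict.modify]
    have hrhs : ngfMap (g.insert (PySem.Str.join " " (PySem.List.slice ng none (some (-1))))
        (g.getD (PySem.Str.join " " (PySem.List.slice ng none (some (-1)))) [] ++ [t]))
      = (ngfMap g).insert (PySem.Str.join " " (PySem.List.slice ng none (some (-1))))
        ((PySem.Dict.counter (g.getD (PySem.Str.join " " (PySem.List.slice ng none (some (-1)))) [])).modify t 0 (· + 1)) := by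
      rw [ngfMap_insert, PySem.Dict.counter_append_singleton]
    rw [hrhs]
    set s := PySem.Str.join " " (PySem.List.slice ng none (some (-1))) with hs
    by_cases h : g.contains s = true
    · have h2 : (ngfMap g).contains s = true := by rw [ngfMap_contains]; exact h
      simp only [h2, if_true]
      rw [ngfMap_getD g hnd s]
      exact congrArg _ (ngfInnerStep _ t)
    · have h' : g.contains s = false := by simpa using h
      have h2 : (ngfMap g).contains s = false := by rw [ngfMap_contains]; exact h'
      simp only [h2, Bool.false_eq_true, if_false]
      rw [PySem.Dict.getD_of_not_contains _ _ h', PySem.Dict.getD_insert_self,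
        PySem.Dict.insert_insert_self]
      exact congrArg _ (ngfInnerStep PySem.Dict.empty t)

theorem ngfB_nodup (g : PySem.Dict String (List String)) (ng : List String)
    (hnd : g.keys.Nodup) : (ngfB_step g ng).keys.Nodup := by
  cases hpg : PySem.List.pyGet? ng (-1) with
  | none => simpa [ngfB_step, hpg] using hnd
  | some t =>
    simp only [ngfB_step, hpg, PySem.Dict.modify]
    exact PySem.Dict.nodup_keys_insert _ _ _ hnd

theorem ngfMain (ngs : List (List String)) (g : PySem.Dict String (List String))
    (hnd : g.keys.Nodup) :
    ngs.foldl ngfA_step (ngfMap g) = ngfMap (ngs.foldl ngfB_step g) := by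
  induction ngs generalizing g with
  | nil => rfl
  | cons ng rest ih =>
    simp only [List.foldl_cons]
    rw [ngfStep g ng hnd]
    exact ih _ (ngfB_nodup g ng hnd)

-- ===== VERDICT (by name: the statement is the Claim_ definition above) =====
theorem ngram_frequence_spec : Claim_equal_ngram_frequence := by
  intro ngrams _ _
  unfold Spec_ngram_frequence ngram_frequence ngram_frequence_alt
  have h0 : (PySem.Dict.empty : PySem.Dict String (PySem.Dict String Int))
      = ngfMap PySem.Dict.empty := rfl
  rw [h0, ngfMain ngrams PySem.Dict.empty PySem.Dict.nodup_keys_empty]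
  simp only [ngfMap, List.map_map]
  apply List.map_congr_left
  intro p _
  simp [PySem.Dict.items_counter]
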